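-- pv_equiv track=rewrite | github.com/cassian-vale/open-pilot-agent | preprocess/chunk.py | add_start_end
-- ===== SOURCE A (Python) =====
-- def add_start_end(chunks, start=0):
--     end = start
--     text = ""
--     for chunk in chunks:
--         if chunk:
--             end = start + len(chunk)
--             text += f"<start={start}>{chunk}<end={end}>\n"
--             start = end
--     return text
-- ===== SOURCE B (Python) =====
-- def add_start_end(chunks, start=0):
--     # Backwards construction: compute the final end offset first, then walk the
--     # chunks in reverse, emitting each piece from its end offset downward.
--     end = start + sum(len(c) for c in chunks if c)
--     parts = []
--     for c in reversed(chunks):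
--         if c:
--             parts.append(f"<start={end - len(c)}>{c}<end={end}>\n")
--             end -= len(c)
--     return "".join(reversed(parts))
-- ===== Notes on version B (the rewrite author's own statement) =====
-- stated objective: alternative
-- what changed: B builds the string backwards: it first computes the final end offset as start plus the total length of the truthy chunks, then walks the chunks in reverse emitting each piece from its end offset downward, and finally reverses the collected pieces before joining, instead of A's forward loop threading start/end through an accumulator.
import Mathlib
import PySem

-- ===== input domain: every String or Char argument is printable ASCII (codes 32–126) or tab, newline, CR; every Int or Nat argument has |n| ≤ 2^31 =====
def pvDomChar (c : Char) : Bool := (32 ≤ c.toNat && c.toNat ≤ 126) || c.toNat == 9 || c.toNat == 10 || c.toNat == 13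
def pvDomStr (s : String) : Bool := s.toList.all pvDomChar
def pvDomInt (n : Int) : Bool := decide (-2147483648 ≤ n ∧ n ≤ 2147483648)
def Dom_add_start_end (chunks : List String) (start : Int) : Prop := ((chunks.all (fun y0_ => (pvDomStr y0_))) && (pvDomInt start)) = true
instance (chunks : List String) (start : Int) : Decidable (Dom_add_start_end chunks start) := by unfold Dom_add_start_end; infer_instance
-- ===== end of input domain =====

-- B builds the result backwards: it computes the final end offset first (start + total truthy length), then walks the chunks in reverse emitting each piece from its end offset downward, reversing the collected pieces at the end; A emits forward in one loop. Same cost, different direction.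

-- ===== PORT A =====
def add_start_end (chunks : List String) (start : Int) : String :=
  (chunks.foldl (fun (st : Int × Int × String) chunk =>
    if chunk ≠ "" then
      let e := st.1 + PySem.Str.len chunk
      (e, e, st.2.2 ++ "<start=" ++ PySem.Int.toStr st.1 ++ ">" ++ chunk ++ "<end=" ++ PySem.Int.toStr e ++ ">\n")
    else st) (start, start, "")).2.2

-- ===== PORT B =====
-- loop body of B's reverse walk: append the piece for c (ending at offset st.2) and move the offset down
def pvStepB (st : List String × Int) (c : String) : List String × Int :=
  if c ≠ "" then
    (st.1 ++ ["<start=" ++ PySem.Int.toStr (st.2 - PySem.Str.len c) ++ ">" ++ c ++ "<end=" ++ PySem.Int.toStr st.2 ++ ">\n"],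
     st.2 - PySem.Str.len c)
  else st

def add_start_end_alt (chunks : List String) (start : Int) : String :=
  let e0 := start + chunks.foldl (fun a c => if c ≠ "" then a + PySem.Str.len c else a) 0
  let st := chunks.reverse.foldl pvStepB ([], e0)
  PySem.Str.join "" st.1.reverse

-- ===== PRECONDITION & SPEC =====
def Spec_add_start_end (chunks : List String) (start : Int) (out : String) : Prop := out = add_start_end_alt chunks start
instance (chunks : List String) (start : Int) (out : String) : Decidable (Spec_add_start_end chunks start out) := by unfold Spec_add_start_end; infer_instance

-- ===== CLAIM (what is proved, stated in full; the proofs are below) =====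
def Claim_equal_add_start_end : Prop := ∀ (chunks : List String) (start : Int), Dom_add_start_end chunks start → Spec_add_start_end chunks start (add_start_end chunks start)

-- ===== LEMMAS AND PROOFS =====

-- the piece emitted for a truthy chunk c starting at offset s
def pvPiece (s : Int) (c : String) : String :=
  "<start=" ++ PySem.Int.toStr s ++ ">" ++ c ++ "<end=" ++ PySem.Int.toStr (s + PySem.Str.len c) ++ ">\n"

-- forward list of pieces: the common reference both ports reduce to
def pvR : List String → Int → List String
  | [], _ => []
  | c :: cs, s => if c = "" then pvR cs s else pvPiece s c :: pvR cs (s + PySem.Str.len c)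

def pvSumT (cs : List String) : Int :=
  cs.foldl (fun a c => if c ≠ "" then a + PySem.Str.len c else a) 0

theorem sumT_acc (cs : List String) (a : Int) :
    cs.foldl (fun a c => if c ≠ "" then a + PySem.Str.len c else a) a = a + pvSumT cs := by
  induction cs generalizing a with
  | nil => simp [pvSumT]
  | cons c cs ih =>
    simp only [pvSumT, List.foldl_cons]
    rw [ih, ih (if c ≠ "" then 0 + PySem.Str.len c else 0)]
    split_ifs <;> ring

theorem sumT_cons (c : String) (cs : List String) :
    pvSumT (c :: cs) = (if c = "" then 0 else PySem.Str.len c) + pvSumT cs := by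
  show List.foldl _ _ (c :: cs) = _
  simp only [List.foldl_cons]
  rw [sumT_acc]
  rcases eq_or_ne c "" with h | h
  · rw [if_neg (by simp [h]), if_pos h]
  · rw [if_pos h, if_neg h]
    ring

theorem intercalate_nil_cons (x : List Char) (l : List (List Char)) :
    List.intercalate ([] : List Char) (x :: l) = x ++ List.intercalate [] l := by
  cases l <;> simp [List.intercalate]

theorem join_cons (x : String) (l : List String) :
    PySem.Str.join "" (x :: l) = x ++ PySem.Str.join "" l := by
  apply String.toList_inj.mp
  simp [PySem.Str.toList_join, PySem.Chars.join, intercalate_nil_cons]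

theorem foldA_eq (cs : List String) (s e : Int) (t : String) :
    (cs.foldl (fun (st : Int × Int × String) chunk =>
      if chunk ≠ "" then
        let e := st.1 + PySem.Str.len chunk
        (e, e, st.2.2 ++ "<start=" ++ PySem.Int.toStr st.1 ++ ">" ++ chunk ++ "<end=" ++ PySem.Int.toStr e ++ ">\n")
      else st) (s, e, t)).2.2 = t ++ PySem.Str.join "" (pvR cs s) := by
  induction cs generalizing s e t with
  | nil => simp [pvR, PySem.Str.join, PySem.Chars.join, List.intercalate]
  | cons c cs ih =>
    by_cases hc : c = ""
    · subst hc
      simp only [List.foldl_cons, ne_eq, not_true_eq_false, if_false, pvR]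
      exact ih s e t
    · simp only [List.foldl_cons, ne_eq, hc, not_false_eq_true, if_true]
      rw [ih]
      rw [show pvR (c :: cs) s = pvPiece s c :: pvR cs (s + PySem.Str.len c) from by simp [pvR, hc]]
      rw [join_cons]
      apply String.toList_inj.mp
      simp [pvPiece]

theorem foldB_eq (cs : List String) (s : Int) (acc : List String) :
    cs.reverse.foldl pvStepB (acc, s + pvSumT cs) = (acc ++ (pvR cs s).reverse, s) := by
  induction cs generalizing s acc with
  | nil => simp [pvSumT, pvR]
  | cons c cs ih =>
    simp only [List.reverse_cons, List.foldl_append, List.foldl_cons, List.foldl_nil]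
    by_cases hc : c = ""
    · subst hc
      rw [sumT_cons]
      simp only [if_true, zero_add]
      rw [ih]
      simp [pvStepB, pvR]
    · have hstep : s + pvSumT (c :: cs) = (s + PySem.Str.len c) + pvSumT cs := by
        rw [sumT_cons]
        simp only [hc, if_false]
        ring
      rw [hstep, ih (s + PySem.Str.len c) acc]
      simp only [pvStepB, ne_eq, hc, not_false_eq_true, if_true, add_sub_cancel_right]
      simp [pvR, hc, pvPiece]

theorem altB_eq (cs : List String) (s : Int) :
    add_start_end_alt cs s = PySem.Str.join "" (pvR cs s) := by
  show PySem.Str.join "" ((cs.reverse.foldl pvStepB ([], s + pvSumT cs)).1).reverse = _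
  rw [foldB_eq]
  simp

-- ===== VERDICT (by name: the statement is the Claim_ definition above) =====
theorem add_start_end_spec : Claim_equal_add_start_end := by
  intro chunks start _
  show add_start_end chunks start = add_start_end_alt chunks start
  rw [add_start_end, foldA_eq, altB_eq]
  apply String.toList_inj.mp
  simp
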